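-- pv_equiv track=rewrite | github.com/steve3ussr/PyCharmProject | LeetCode/LeetCodeDatabase/1043_partition-array-for-maximum-sum.py | v2_iter_cache
-- ===== SOURCE A (Python) =====
-- from functools import cache
--
-- def v2_iter_cache(arr, k):
--     @cache
--     def func(length):
--         if length <= k:
--             return length * max(arr[:length])
--
--         ma = 0
--         for i in range(length-1, length-1-k, -1):
--             lst_rear = arr[i:length]
--             ma = max(ma, func(i) + max(lst_rear) * len(lst_rear))
--
--         return ma
--
--     return func(len(arr))
-- ===== SOURCE B (Python) =====
-- def v2_iter_cache(arr, k):
--     # Bottom-up DP with a running window maximum: O(n*k) instead of A's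
--     # O(n*k^2) memoized recursion that re-slices and re-scans each window.
--     n = len(arr)
--     dp = [0] * (n + 1)
--     pm = arr[0] if arr else 0  # running max of arr[:i]
--     for i in range(1, n + 1):
--         pm = max(pm, arr[i - 1])
--         if i <= k:
--             dp[i] = i * pm
--         else:
--             best = 0
--             m = arr[i - 1]  # running max of arr[i-j:i]
--             for j in range(1, k + 1):
--                 m = max(m, arr[i - j])
--                 best = max(best, dp[i - j] + m * j)
--             dp[i] = best
--     return dp[n]
-- ===== Notes on version B (the rewrite author's own statement) =====
-- stated objective: faster
-- what changed: Replaced A's memoized top-down recursion, which re-slices the array and rescans each window with max() in the inner loop, by a bottom-up DP table with a running window maximum (and a running prefix maximum for the i<=k base case), removing the inner rescans.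
import Mathlib
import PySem

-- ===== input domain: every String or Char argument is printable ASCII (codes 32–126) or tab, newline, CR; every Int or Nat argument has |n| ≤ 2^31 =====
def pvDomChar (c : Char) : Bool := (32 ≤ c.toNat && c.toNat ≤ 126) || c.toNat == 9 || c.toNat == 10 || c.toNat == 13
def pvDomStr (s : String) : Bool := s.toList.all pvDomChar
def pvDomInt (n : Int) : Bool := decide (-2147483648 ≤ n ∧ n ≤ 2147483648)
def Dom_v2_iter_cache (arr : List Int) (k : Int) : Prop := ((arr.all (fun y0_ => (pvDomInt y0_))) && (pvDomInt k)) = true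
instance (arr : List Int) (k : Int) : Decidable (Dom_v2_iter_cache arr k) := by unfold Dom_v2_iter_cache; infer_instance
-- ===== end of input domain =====

-- B replaces A's memoized recursion (re-scanning each window with max()) by a
-- bottom-up DP with running window/prefix maxima; equal on all inputs where A returns.


-- ===== PORT A =====
-- the cached recursive helper 'func'; @cache only memoizes, the value is that of the
-- plain recursion.  max(lst) is ported as (max? lst id).getD 0: Python raises there on an
-- empty lst, which is reachable only at arr = [] with 0 ≤ k, excluded by Pre_.
def v2cacheFunc (arr : List Int) (k : Int) (L : Nat) : Int :=
  if (L : Int) ≤ k then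
    (L : Int) * (PySem.List.max? (PySem.List.slice arr (some 0) (some (L : Int))) (fun y => y)).getD 0
  else
    (PySem.List.pyRange ((L : Int) - 1) ((L : Int) - 1 - k) (-1)).attach.foldl
      (fun ma iw =>
        let lst_rear := PySem.List.slice arr (some iw.1) (some (L : Int))
        max ma (v2cacheFunc arr k iw.1.toNat +
                (PySem.List.max? lst_rear (fun y => y)).getD 0 * (lst_rear.length : Int)))
      0
  termination_by L
  decreasing_by
    rename_i hL
    have hmem := (PySem.List.mem_pyRange_neg_one (x := iw.1)).mp iw.2
    simp only [not_le] at hL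
    omega

def v2_iter_cache (arr : List Int) (k : Int) : Int :=
  v2cacheFunc arr k arr.length

-- ===== PORT B =====
-- inner loop of Source B: state (m, best), j runs over range(1, k+1)
def v2AltInner (arr dp : List Int) (k : Int) (i : Int) : Int × Int :=
  (PySem.List.pyRange 1 (k + 1) 1).foldl
    (fun mb j =>
      let m' := max mb.1 (PySem.List.pyGetD arr (i - j) 0)
      (m', max mb.2 (PySem.List.pyGetD dp (i - j) 0 + m' * j)))
    (PySem.List.pyGetD arr (i - 1) 0, 0)

-- outer loop of Source B: state (dp, pm), i runs over range(1, n+1)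
def v2AltStep (arr : List Int) (k : Int) (st : List Int × Int) (i : Int) : List Int × Int :=
  let pm' := max st.2 (PySem.List.pyGetD arr (i - 1) 0)
  if i ≤ k then (PySem.List.pySetD st.1 i (i * pm'), pm')
  else (PySem.List.pySetD st.1 i (v2AltInner arr st.1 k i).2, pm')

def v2_iter_cache_alt (arr : List Int) (k : Int) : Int :=
  let n := arr.length
  let st := (PySem.List.pyRange 1 ((n : Int) + 1) 1).foldl (v2AltStep arr k)
              (List.replicate (n + 1) 0, arr.headD 0)
  PySem.List.pyGetD st.1 (n : Int) 0

-- ===== PRECONDITION & SPEC =====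
-- Pre_ excludes exactly the inputs where the Python A raises (ValueError from max([])):
-- arr = [] with 0 ≤ k.  Everywhere else A returns normally.
def Pre_v2_iter_cache (arr : List Int) (k : Int) : Prop := ¬ (arr = [] ∧ 0 ≤ k)
instance (arr : List Int) (k : Int) : Decidable (Pre_v2_iter_cache arr k) := by
  unfold Pre_v2_iter_cache; infer_instance

def pvWitness_v2_iter_cache : List Int × Int := ([1, 15, 7, 9, 2, 5, 10], 3)

def Spec_v2_iter_cache (arr : List Int) (k : Int) (out : Int) : Prop := out = v2_iter_cache_alt arr k
instance (arr : List Int) (k : Int) (out : Int) : Decidable (Spec_v2_iter_cache arr k out) := by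
  unfold Spec_v2_iter_cache; infer_instance

-- ===== CLAIM (what is proved, stated in full; the proofs are below) =====
def Claim_equal_v2_iter_cache : Prop := ∀ (arr : List Int) (k : Int), Dom_v2_iter_cache arr k → Pre_v2_iter_cache arr k → Spec_v2_iter_cache arr k (v2_iter_cache arr k)

-- ===== LEMMAS AND PROOFS =====

-- the body of A's loop, as a plain fold function (attach removed)
def pvG (arr : List Int) (k : Int) (L : Nat) : Int → Int → Int :=
  fun ma i =>
    let lst_rear := PySem.List.slice arr (some i) (some (L : Int))
    max ma (v2cacheFunc arr k i.toNat +
            (PySem.List.max? lst_rear (fun y => y)).getD 0 * (lst_rear.length : Int))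

-- max of the window arr[p:L], as A computes it
def pvMsl (arr : List Int) (p L : Int) : Int :=
  (PySem.List.max? (PySem.List.slice arr (some p) (some L)) (fun y => y)).getD 0

-- B's outer-loop state after i iterations
def pvSt (arr : List Int) (k : Int) (i : Nat) : List Int × Int :=
  (PySem.List.pyRange 1 ((i : Int) + 1) 1).foldl (v2AltStep arr k)
    (List.replicate (arr.length + 1) 0, arr.headD 0)

lemma fA_if (arr : List Int) (k : Int) (L : Nat) (h : (L : Int) ≤ k) :
    v2cacheFunc arr k L =
      (L : Int) * (PySem.List.max? (PySem.List.slice arr (some 0) (some (L : Int))) (fun y => y)).getD 0 := by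
  rw [v2cacheFunc, if_pos h]

lemma fA_else (arr : List Int) (k : Int) (L : Nat) (h : ¬ (L : Int) ≤ k) :
    v2cacheFunc arr k L =
      (PySem.List.pyRange ((L : Int) - 1) ((L : Int) - 1 - k) (-1)).foldl (pvG arr k L) 0 := by
  rw [v2cacheFunc, if_neg h]
  exact List.foldl_attach (f := pvG arr k L)

lemma fA_zero (arr : List Int) (k : Int) : v2cacheFunc arr k 0 = 0 := by
  rw [v2cacheFunc]
  by_cases h : (((0 : Nat) : Int)) ≤ k
  · rw [if_pos h]; push_cast; ring
  · rw [if_neg h]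
    have he : PySem.List.pyRange (((0 : Nat) : Int) - 1) (((0 : Nat) : Int) - 1 - k) (-1) = [] :=
      PySem.List.pyRange_neg_one_eq_nil (by push_cast at h ⊢; omega)
    rw [he]; rfl

lemma pyRange_neg_split (a : Int) (c : Nat) :
    PySem.List.pyRange a (a - ((c : Int) + 1)) (-1) =
      PySem.List.pyRange a (a - (c : Int)) (-1) ++ [a - (c : Int)] := by
  rw [PySem.List.pyRange_neg_one, PySem.List.pyRange_neg_one]
  have h1 : (a - (a - ((c : Int) + 1))).toNat = c + 1 := by omega
  have h2 : (a - (a - (c : Int))).toNat = c := by omega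
  rw [h1, h2, List.range_succ, List.map_append]
  simp

lemma msl_singleton (arr : List Int) (L : Nat) (h1 : 1 ≤ L) (h2 : L ≤ arr.length) :
    pvMsl arr ((L : Int) - 1) (L : Int) = arr.getD (L - 1) 0 := by
  unfold pvMsl
  have hc : ((L : Int) - 1) = ((L - 1 : Nat) : Int) := by omega
  rw [hc, PySem.List.slice_natCast]
  have h3 : L - (L - 1) = 1 := by omega
  have hlt : L - 1 < arr.length := by omega
  rw [h3, List.drop_eq_getElem_cons hlt]
  have ht : List.take 1 (arr[L - 1] :: List.drop (L - 1 + 1) arr) = [arr[L - 1]] := rfl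
  rw [ht, PySem.List.max?_id_cons]
  simp [List.getD_eq_getElem?_getD, List.getElem?_eq_getElem hlt]

lemma msl_cons (arr : List Int) (p L : Nat) (hp : p + 1 < L) (hL : L ≤ arr.length) :
    pvMsl arr (p : Int) (L : Int) = max (arr.getD p 0) (pvMsl arr ((p : Int) + 1) (L : Int)) := by
  unfold pvMsl
  have hpl : p < arr.length := by omega
  have hp1l : p + 1 < arr.length := by omega
  rw [show ((p : Int) + 1) = ((p + 1 : Nat) : Int) by push_cast; ring]
  rw [PySem.List.slice_natCast, PySem.List.slice_natCast]
  rw [List.drop_eq_getElem_cons hpl]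
  rw [show L - p = (L - (p + 1)) + 1 by omega, List.take_succ_cons]
  rw [List.drop_eq_getElem_cons hp1l]
  rw [show L - (p + 1) = (L - (p + 2)) + 1 by omega, List.take_succ_cons]
  rw [PySem.List.max?_id_cons, PySem.List.max?_id_cons]
  simp only [Option.getD_some]
  rw [List.foldl_cons, List.foldl_assoc]
  simp [List.getD_eq_getElem?_getD, List.getElem?_eq_getElem hpl]

lemma prefmax (arr : List Int) (j : Nat) (hj : 1 ≤ j) (harr : arr ≠ []) :
    (PySem.List.max? (arr.take j) (fun y => y)).getD 0 = (arr.take j).foldl max (arr.headD 0) := by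
  obtain ⟨a, rest, rfl⟩ := List.exists_cons_of_ne_nil harr
  cases j with
  | zero => omega
  | succ j' =>
    rw [List.take_succ_cons, PySem.List.max?_id_cons]
    simp [List.foldl_cons]

lemma slice_len_window (arr : List Int) (p L : Nat) (hp : p < L) (hL : L ≤ arr.length) :
    ((PySem.List.slice arr (some (p : Int)) (some (L : Int))).length : Int) = (L : Int) - (p : Int) := by
  rw [PySem.List.length_slice, PySem.List.clampIdx_natCast, PySem.List.clampIdx_natCast]
  omega

lemma inner_invariant (arr dp : List Int) (k : Int) (L : Nat)
    (_hk : 1 ≤ k) (hL : k < (L : Int)) (hLn : L ≤ arr.length)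
    (hdp : ∀ t : Nat, t < L → PySem.List.pyGetD dp (t : Int) 0 = v2cacheFunc arr k t) :
    ∀ c : Nat, 1 ≤ c → (c : Int) ≤ k →
      (PySem.List.pyRange 1 ((c : Int) + 1) 1).foldl
        (fun mb j =>
          let m' := max mb.1 (PySem.List.pyGetD arr ((L : Int) - j) 0)
          (m', max mb.2 (PySem.List.pyGetD dp ((L : Int) - j) 0 + m' * j)))
        (PySem.List.pyGetD arr ((L : Int) - 1) 0, 0)
      = (pvMsl arr ((L : Int) - (c : Int)) (L : Int),
         (PySem.List.pyRange ((L : Int) - 1) ((L : Int) - 1 - (c : Int)) (-1)).foldl (pvG arr k L) 0) := by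
  intro c
  induction c with
  | zero => intro h; omega
  | succ c ih =>
    intro _ hck
    have hLk : (c : Int) + 1 < (L : Int) := by push_cast at hck; omega
    by_cases hc0 : c = 0
    · subst hc0
      rw [show ((0 + 1 : Nat) : Int) + 1 = 1 + 1 by norm_num]
      rw [PySem.List.pyRange_one_singleton]
      simp only [List.foldl_cons, List.foldl_nil]
      rw [show ((L : Int) - 1 - ((0 + 1 : Nat) : Int)) = ((L : Int) - 1) - 1 by push_cast; ring]
      rw [PySem.List.pyRange_neg_one_cons (by omega : (L : Int) - 1 - 1 < (L : Int) - 1)]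
      rw [PySem.List.pyRange_neg_one_eq_nil (le_refl ((L : Int) - 1 - 1))]
      simp only [List.foldl_cons, List.foldl_nil]
      unfold pvG
      have hL1 : ((L : Int) - 1) = ((L - 1 : Nat) : Int) := by omega
      have hlt : L - 1 < arr.length := by omega
      have hmsl := msl_singleton arr L (by omega) hLn
      have htn : ((L : Int) - 1).toNat = L - 1 := by omega
      have hlen : ((PySem.List.slice arr (some ((L : Int) - 1)) (some (L : Int))).length : Int) = 1 := by
        rw [hL1, slice_len_window arr (L - 1) L (by omega) hLn]; omega
      have hg : PySem.List.pyGetD arr ((L : Int) - 1) 0 = arr.getD (L - 1) 0 := by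
        rw [hL1, PySem.List.pyGetD_natCast]
      have hdp1 : PySem.List.pyGetD dp ((L : Int) - 1) 0 = v2cacheFunc arr k (L - 1) := by
        rw [hL1]; exact hdp (L - 1) (by omega)
      simp only [Prod.mk.injEq]
      constructor
      · rw [max_self, hg, show ((L : Int) - ((0 + 1 : Nat) : Int)) = (L : Int) - 1 by push_cast; ring, hmsl]
      · rw [max_self, hg, hdp1, htn, hlen, mul_one, mul_one, ← hmsl]
        unfold pvMsl
        rfl
    · have hc1 : 1 ≤ c := Nat.one_le_iff_ne_zero.mpr hc0
      have hck' : (c : Int) ≤ k := by push_cast at hck ⊢; omega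
      have IH := ih hc1 hck'
      rw [show ((c + 1 : Nat) : Int) + 1 = ((c : Int) + 1) + 1 by push_cast; ring]
      rw [PySem.List.pyRange_one_succ_right (by omega : (1 : Int) ≤ (c : Int) + 1)]
      rw [List.foldl_append, IH]
      simp only [List.foldl_cons, List.foldl_nil]
      rw [show ((L : Int) - 1 - ((c + 1 : Nat) : Int)) = ((L : Int) - 1) - ((c : Int) + 1) by push_cast; ring]
      rw [pyRange_neg_split ((L : Int) - 1) c]
      rw [List.foldl_append]
      simp only [List.foldl_cons, List.foldl_nil]
      have hcL : c + 1 < L := by omega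
      have hidx : (L : Int) - ((c : Int) + 1) = ((L - (c + 1) : Nat) : Int) := by omega
      have hgetm : PySem.List.pyGetD arr ((L : Int) - ((c : Int) + 1)) 0 = arr.getD (L - (c + 1)) 0 := by
        rw [hidx, PySem.List.pyGetD_natCast]
      have hmc := msl_cons arr (L - (c + 1)) L (by omega) hLn
      have hidc : ((L - (c + 1) : Nat) : Int) + 1 = (L : Int) - (c : Int) := by omega
      rw [hidc] at hmc
      have hmm : max (pvMsl arr ((L : Int) - (c : Int)) (L : Int)) (PySem.List.pyGetD arr ((L : Int) - ((c : Int) + 1)) 0)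
          = pvMsl arr ((L : Int) - ((c : Int) + 1)) (L : Int) := by
        rw [hgetm, hidx, hmc, max_comm]
      have hdpc : PySem.List.pyGetD dp ((L : Int) - ((c : Int) + 1)) 0 = v2cacheFunc arr k (L - (c + 1)) := by
        rw [hidx]; exact hdp (L - (c + 1)) (by omega)
      unfold pvG
      have heq2 : (L : Int) - 1 - (c : Int) = (L : Int) - ((c : Int) + 1) := by ring
      have htn : ((L : Int) - 1 - (c : Int)).toNat = L - (c + 1) := by omega
      have hlen : ((PySem.List.slice arr (some ((L : Int) - 1 - (c : Int))) (some (L : Int))).length : Int) = (c : Int) + 1 := by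
        rw [heq2, hidx, slice_len_window arr (L - (c + 1)) L (by omega) hLn]; omega
      simp only [Prod.mk.injEq]
      constructor
      · exact hmm
      · rw [hmm, hdpc, htn, hlen, heq2]
        unfold pvMsl
        rfl

lemma pvSt_succ (arr : List Int) (k : Int) (i : Nat) :
    pvSt arr k (i + 1) = v2AltStep arr k (pvSt arr k i) ((i : Int) + 1) := by
  unfold pvSt
  rw [show ((i + 1 : Nat) : Int) + 1 = ((i : Int) + 1) + 1 by push_cast; ring]
  rw [PySem.List.pyRange_one_succ_right (by omega : (1 : Int) ≤ (i : Int) + 1)]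
  rw [List.foldl_append]
  rfl

lemma outer_invariant (arr : List Int) (k : Int) (harr : arr ≠ []) :
    ∀ i : Nat, i ≤ arr.length →
      (pvSt arr k i).1.length = arr.length + 1 ∧
      (∀ t : Nat, t ≤ i → PySem.List.pyGetD (pvSt arr k i).1 (t : Int) 0 = v2cacheFunc arr k t) ∧
      (pvSt arr k i).2 = (arr.take i).foldl max (arr.headD 0) := by
  intro i
  induction i with
  | zero =>
    intro _
    have h0 : pvSt arr k 0 = (List.replicate (arr.length + 1) 0, arr.headD 0) := by
      unfold pvSt
      rw [show ((0 : Nat) : Int) + 1 = 1 by norm_num]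
      rw [PySem.List.pyRange_one_eq_nil le_rfl]
      rfl
    refine ⟨by rw [h0]; exact List.length_replicate, ?_, by rw [h0]; rfl⟩
    intro t ht
    have ht0 : t = 0 := by omega
    subst ht0
    rw [h0, PySem.List.pyGetD_natCast, List.getD_replicate _ (by omega)]
    exact (fA_zero arr k).symm
  | succ i ih =>
    intro hi
    obtain ⟨hlen, hdp, hpm⟩ := ih (by omega)
    have hiL : i < arr.length := by omega
    have hga : PySem.List.pyGetD arr (((i : Int) + 1) - 1) 0 = arr.getD i 0 := by
      rw [show ((i : Int) + 1) - 1 = ((i : Nat) : Int) by ring, PySem.List.pyGetD_natCast]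
    have hpm' : max (pvSt arr k i).2 (arr.getD i 0) = (arr.take (i + 1)).foldl max (arr.headD 0) := by
      rw [hpm, show arr.getD i 0 = arr[i] from by
            rw [List.getD_eq_getElem?_getD, List.getElem?_eq_getElem hiL]; rfl]
      rw [List.take_add_one, List.getElem?_eq_getElem hiL, Option.toList_some,
          List.foldl_append, List.foldl_cons, List.foldl_nil]
    have hset : ∀ v, PySem.List.pySetD (pvSt arr k i).1 ((i : Int) + 1) v = (pvSt arr k i).1.set (i + 1) v := by
      intro v
      rw [show ((i : Int) + 1) = ((i + 1 : Nat) : Int) by push_cast; ring]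
      unfold PySem.List.pySetD
      rw [PySem.List.pySet?_natCast _ _ _ (by rw [hlen]; omega)]
      rfl
    have hkey : v2AltStep arr k (pvSt arr k i) ((i : Int) + 1)
        = ((pvSt arr k i).1.set (i + 1) (v2cacheFunc arr k (i + 1)), (arr.take (i + 1)).foldl max (arr.headD 0)) := by
      unfold v2AltStep
      by_cases hbr : ((i : Int) + 1) ≤ k
      · rw [if_pos hbr, hga, hpm', hset]
        have hfa : v2cacheFunc arr k (i + 1)
            = ((i : Int) + 1) * ((arr.take (i + 1)).foldl max (arr.headD 0)) := by
          rw [fA_if arr k (i + 1) (by push_cast; omega)]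
          rw [PySem.List.slice_zero_start, PySem.List.slice_to_natCast]
          rw [prefmax arr (i + 1) (by omega) harr]
          push_cast; ring
        rw [hfa]
      · rw [if_neg hbr, hga, hpm', hset]
        have hbrn : ¬ ((i + 1 : Nat) : Int) ≤ k := by push_cast; omega
        by_cases hk1 : 1 ≤ k
        · have hknat : ((k.toNat : Nat) : Int) = k := Int.toNat_of_nonneg (by omega)
          have hLcast : ((i + 1 : Nat) : Int) = (i : Int) + 1 := by push_cast; ring
          have hinner := inner_invariant arr (pvSt arr k i).1 k (i + 1) hk1
            (by push_cast; omega) (by omega)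
            (fun t ht => hdp t (by omega)) k.toNat (by omega) (by rw [hknat])
          rw [hknat, hLcast] at hinner
          have hA : v2cacheFunc arr k (i + 1)
              = (PySem.List.pyRange ((i : Int) + 1 - 1) ((i : Int) + 1 - 1 - k) (-1)).foldl (pvG arr k (i + 1)) 0 := by
            rw [fA_else arr k (i + 1) hbrn, hLcast]
          have hB : v2AltInner arr (pvSt arr k i).1 k ((i : Int) + 1)
              = (pvMsl arr ((i : Int) + 1 - k) ((i : Int) + 1),
                 (PySem.List.pyRange ((i : Int) + 1 - 1) ((i : Int) + 1 - 1 - k) (-1)).foldl (pvG arr k (i + 1)) 0) := by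
            unfold v2AltInner
            exact hinner
          rw [hB, hA]
        · have hinz : v2AltInner arr (pvSt arr k i).1 k ((i : Int) + 1) = (PySem.List.pyGetD arr (((i : Int) + 1) - 1) 0, 0) := by
            unfold v2AltInner
            rw [PySem.List.pyRange_one_eq_nil (by omega : k + 1 ≤ 1)]
            rfl
          have hfa : v2cacheFunc arr k (i + 1) = 0 := by
            rw [fA_else arr k (i + 1) hbrn]
            rw [PySem.List.pyRange_neg_one_eq_nil (by push_cast; omega)]
            rfl
          rw [hinz, hfa]
    rw [pvSt_succ, hkey]
    refine ⟨by simp [hlen], ?_, rfl⟩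
    intro t ht
    rw [PySem.List.pyGetD_natCast]
    by_cases htt : t = i + 1
    · subst htt
      rw [List.getD_eq_getElem?_getD, List.getElem?_eq_getElem (by simp [hlen]; omega)]
      simp
    · have htl : t < (pvSt arr k i).1.length := by rw [hlen]; omega
      rw [List.getD_eq_getElem?_getD, List.getElem?_eq_getElem (by simp [hlen]; omega)]
      rw [List.getElem_set_ne (by omega)]
      have := hdp t (by omega)
      rw [PySem.List.pyGetD_natCast, List.getD_eq_getElem?_getD, List.getElem?_eq_getElem htl] at this
      simpa using this

-- ===== VERDICT (by name: the statement is the Claim_ definition above) =====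
theorem v2_iter_cache_spec : Claim_equal_v2_iter_cache := by
  intro arr k hdom hpre
  unfold Spec_v2_iter_cache
  by_cases harr : arr = []
  · subst harr
    rw [v2_iter_cache]
    simp only [List.length_nil]
    rw [fA_zero]
    rfl
  · have h := (outer_invariant arr k harr arr.length le_rfl).2.1 arr.length le_rfl
    rw [v2_iter_cache]
    exact h.symm
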